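-- pv_equiv track=rewrite | github.com/Zhengsh123/Daily-Paper | reporter.py | _fix_markdown_for_pdf
-- ===== SOURCE A (Python) =====
-- def _fix_markdown_for_pdf(text: str) -> str:
--     """修复 markdown 文本以确保列表和换行在 HTML 转换后正确渲染。
--
--     在非列表行后紧跟的首个 '- ' 列表项前插入空行（markdown 要求列表前有空行才识别为列表）。
--     连续的 '- ' 列表项之间不插入空行，保持紧凑列表。
--     """
--     lines = text.split('\n')
--     result = []
--     for i, line in enumerate(lines):
--         # 当前行是列表项，前一行非空且不是列表项 → 插入空行
--         if line.startswith('- ') and i > 0 and result and result[-1] != '' and not result[-1].startswith('- '):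
--             result.append('')
--         result.append(line)
--     return '\n'.join(result)
-- ===== SOURCE B (Python) =====
-- def _fix_markdown_for_pdf(text: str) -> str:
--     # Pattern-driven rewrite: split the text on the marker '\n- ' (each boundary
--     # is exactly a list item that follows some line) and rejoin, widening the
--     # separator to '\n\n- ' precisely when the line ending at the boundary is
--     # non-empty and not itself a list item.  No per-line scan, no accumulator
--     # of lines; the last line before each boundary is carried along.
--     parts = text.split('\n- ')
--     out = parts[0]
--     last = parts[0].split('\n')[-1]
--     for chunk in parts[1:]:
--         sep = '\n\n- ' if last and not last.startswith('- ') else '\n- '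
--         out += sep + chunk
--         last = ('- ' + chunk).split('\n')[-1]
--     return out
-- ===== Notes on version B (the rewrite author's own statement) =====
-- stated objective: alternative
-- what changed: Replaced the per-line accumulator scan (enumerate lines, inspect result[-1], append blanks) with a pattern-driven rewrite: split the whole text on the list-marker separator '\n- ' and rejoin the chunks, widening a boundary's separator to '\n\n- ' exactly when the line ending there is non-empty and not a list item.
import Mathlib
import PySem

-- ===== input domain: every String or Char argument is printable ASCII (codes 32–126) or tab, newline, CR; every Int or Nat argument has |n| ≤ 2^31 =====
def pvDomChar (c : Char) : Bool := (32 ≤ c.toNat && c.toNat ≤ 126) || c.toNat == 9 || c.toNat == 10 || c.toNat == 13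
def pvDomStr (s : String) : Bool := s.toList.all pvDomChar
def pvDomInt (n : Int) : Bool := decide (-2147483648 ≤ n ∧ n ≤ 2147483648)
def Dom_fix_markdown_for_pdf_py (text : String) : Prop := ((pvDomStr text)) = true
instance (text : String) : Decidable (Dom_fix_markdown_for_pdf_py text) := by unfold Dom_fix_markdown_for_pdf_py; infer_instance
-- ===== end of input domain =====

-- B replaces A's per-line accumulator scan by a pattern-driven rewrite: split the text on the
-- list-marker separator "\n- " and rejoin, widening a boundary's separator to "\n\n- " exactly
-- when the line ending there is non-empty and not itself a list item; same return value.

-- ===== PORT A =====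
-- the loop body of A's 'for i, line in enumerate(lines)' (result[-1] read via getLast?;
-- Python checks 'result' truthy before reading result[-1], mirrored by the isEmpty test)
def aStep (result : List String) (p : Int × String) : List String :=
  let result :=
    if PySem.Str.startswith p.2 "- " && decide (0 < p.1) && !result.isEmpty &&
       !((result.getLast?.getD "") == "") &&
       !PySem.Str.startswith (result.getLast?.getD "") "- "
    then result ++ [""] else result
  result ++ [p.2]

def fix_markdown_for_pdf_py (text : String) : String :=
  -- text.split('\n'): sep is the non-empty literal "\n", so split? is always 'some'
  let lines := (PySem.Str.split? text "\n").getD []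
  let result := (PySem.List.enumerate lines).foldl aStep []
  PySem.Str.join "\n" result

-- ===== PORT B =====
-- Source B's loop body: state = (out, last); widen the separator when 'last' is a
-- non-empty non-list line, then recompute 'last' as ('- ' + chunk).split('\n')[-1]
def bStep (st : String × String) (chunk : String) : String × String :=
  let sep := if !(st.2 == "") && !PySem.Str.startswith st.2 "- " then "\n\n- " else "\n- "
  (st.1 ++ sep ++ chunk,
   (PySem.List.pyGet? ((PySem.Str.split? ("- " ++ chunk) "\n").getD []) (-1)).getD "")

def fix_markdown_for_pdf_py_alt (text : String) : String :=
  let parts := (PySem.Str.split? text "\n- ").getD []        -- text.split('\n- ') (sep non-empty)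
  let p0 := (PySem.List.pyGet? parts 0).getD ""              -- parts[0] (split is never empty)
  let last0 := (PySem.List.pyGet? ((PySem.Str.split? p0 "\n").getD []) (-1)).getD ""
  ((PySem.List.slice parts (some 1) none).foldl bStep (p0, last0)).1

-- ===== PRECONDITION & SPEC =====
def Spec_fix_markdown_for_pdf_py (text : String) (out : String) : Prop := out = fix_markdown_for_pdf_py_alt text
instance (text : String) (out : String) : Decidable (Spec_fix_markdown_for_pdf_py text out) := by unfold Spec_fix_markdown_for_pdf_py; infer_instance

-- ===== CLAIM (what is proved, stated in full; the proofs are below) =====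
def Claim_equal_fix_markdown_for_pdf_py : Prop := ∀ (text : String), Dom_fix_markdown_for_pdf_py text → Spec_fix_markdown_for_pdf_py text (fix_markdown_for_pdf_py text)

-- ===== LEMMAS AND PROOFS =====

def mapHead (f : List Char → List Char) : List (List Char) → List (List Char)
  | [] => []
  | p :: ps => f p :: ps

def mySplitF (sep : List Char) : Nat → List Char → List (List Char)
  | _, [] => [[]]
  | 0, _ :: _ => [[]]
  | f + 1, c :: rest =>
    if sep.isPrefixOf (c :: rest) then [] :: mySplitF sep f ((c :: rest).drop sep.length)
    else mapHead (c :: ·) (mySplitF sep f rest)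

theorem mySplitF_nil (sep : List Char) (f : Nat) : mySplitF sep f [] = [[]] := by
  cases f <;> rfl

theorem mySplitF_ne_nil (sep : List Char) (f : Nat) (l : List Char) : mySplitF sep f l ≠ [] := by
  match f, l with
  | _, [] => simp [mySplitF_nil]
  | 0, _ :: _ => simp [mySplitF]
  | f + 1, c :: rest =>
    simp only [mySplitF]
    split
    · simp
    · rcases h : mySplitF sep f rest with _ | ⟨p, ps⟩
      · exact absurd h (mySplitF_ne_nil sep f rest)
      · simp [mapHead]

theorem go_eq (sep : List Char) (hsep : sep ≠ []) : ∀ (f : Nat) (l : List Char)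
    (cur : List Char) (acc : List (List Char)), l.length ≤ f →
    PySem.Chars.splitOn.go sep f l cur acc
      = acc.reverse ++ mapHead (fun p => cur.reverse ++ p) (mySplitF sep f l) := by
  intro f
  induction f with
  | zero =>
    intro l cur acc h
    have : l = [] := by cases l <;> simp_all
    subst this
    simp [PySem.Chars.splitOn.go, mySplitF_nil, mapHead]
  | succ f ih =>
    intro l cur acc h
    cases l with
    | nil => simp [PySem.Chars.splitOn.go, mySplitF_nil, mapHead]
    | cons c rest =>
      rw [show PySem.Chars.splitOn.go sep (f+1) (c :: rest) cur acc
          = if sep.isPrefixOf (c :: rest) then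
              PySem.Chars.splitOn.go sep f ((c :: rest).drop sep.length) [] (cur.reverse :: acc)
            else PySem.Chars.splitOn.go sep f rest (c :: cur) acc from rfl]
      by_cases hp : sep.isPrefixOf (c :: rest) = true
      · have hlen : ((c :: rest).drop sep.length).length ≤ f := by
          have : 1 ≤ sep.length := by cases sep <;> simp_all
          simp only [List.length_drop, List.length_cons] at *
          omega
        rw [if_pos hp, ih _ [] _ hlen]
        simp only [mySplitF, hp, if_pos]
        rcases mySplitF sep f ((c :: rest).drop sep.length) with _ | ⟨p, ps⟩ <;>
          simp [mapHead]
      · have hlen : rest.length ≤ f := by simp at h; omega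
        rw [if_neg hp, ih rest (c :: cur) acc hlen]
        simp only [mySplitF, hp, if_neg, Bool.false_eq_true, not_false_iff]
        rcases mySplitF sep f rest with _ | ⟨p, ps⟩ <;> simp [mapHead]

theorem splitOn_eq (sep l : List Char) (hsep : sep ≠ []) :
    PySem.Chars.splitOn l sep = mySplitF sep (l.length + 1) l := by
  rw [PySem.Chars.splitOn, go_eq sep hsep (l.length + 1) l [] [] (by omega)]
  rcases mySplitF sep (l.length + 1) l with _ | ⟨p, ps⟩ <;> simp [mapHead]

theorem join_mySplitF (sep : List Char) (hsep : sep ≠ []) : ∀ (f : Nat) (l : List Char),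
    l.length ≤ f → PySem.Chars.join sep (mySplitF sep f l) = l := by
  intro f
  induction f with
  | zero =>
    intro l h
    have : l = [] := by cases l <;> simp_all
    subst this; simp [mySplitF_nil, PySem.Chars.join_singleton]
  | succ f ih =>
    intro l h
    cases l with
    | nil => simp [mySplitF_nil, PySem.Chars.join_singleton]
    | cons c rest =>
      simp only [mySplitF]
      by_cases hp : sep.isPrefixOf (c :: rest) = true
      · rw [if_pos hp]
        have hpre : sep <+: (c :: rest) := List.isPrefixOf_iff_prefix.mp hp
        have hdec : sep ++ (c :: rest).drop sep.length = c :: rest :=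
          List.prefix_iff_eq_append.mp hpre
        have hlen : ((c :: rest).drop sep.length).length ≤ f := by
          have : 1 ≤ sep.length := by cases sep <;> simp_all
          simp only [List.length_drop, List.length_cons] at *
          omega
        rcases hm : mySplitF sep f ((c :: rest).drop sep.length) with _ | ⟨p, ps⟩
        · exact absurd hm (mySplitF_ne_nil _ _ _)
        · rw [PySem.Chars.join_cons_cons]
          have := ih _ hlen
          rw [hm] at this
          simp [this, hdec]
      · rw [if_neg hp]
        have hlen : rest.length ≤ f := by simp at h; omega
        rcases hm : mySplitF sep f rest with _ | ⟨p, ps⟩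
        · exact absurd hm (mySplitF_ne_nil _ _ _)
        · have := ih _ hlen
          rw [hm] at this
          cases ps with
          | nil => simp_all [mapHead, PySem.Chars.join_singleton]
          | cons q qs =>
            rw [PySem.Chars.join_cons_cons] at this
            simp [mapHead, PySem.Chars.join_cons_cons, this]

theorem head_mySplitF_prefix (sep : List Char) : ∀ (f : Nat) (l : List Char),
    (mySplitF sep f l).headD [] <+: l := by
  intro f
  induction f with
  | zero =>
    intro l; cases l <;> simp [mySplitF]
  | succ f ih =>
    intro l
    cases l with
    | nil => simp [mySplitF_nil]
    | cons c rest =>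
      simp only [mySplitF]
      by_cases hp : sep.isPrefixOf (c :: rest) = true
      · rw [if_pos hp]; simp
      · rw [if_neg hp]
        rcases hm : mySplitF sep f rest with _ | ⟨p, ps⟩
        · exact absurd hm (mySplitF_ne_nil _ _ _)
        · have := ih rest
          rw [hm] at this
          simp only [List.headD_cons] at this
          simpa [mapHead] using this

theorem not_infix_mySplitF (sep : List Char) (hsep : sep ≠ []) : ∀ (f : Nat) (l : List Char),
    l.length ≤ f → ∀ p ∈ mySplitF sep f l, ¬ sep <:+: p := by
  intro f
  induction f with
  | zero =>
    intro l h p hp hinf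
    have : l = [] := by cases l <;> simp_all
    subst this
    rw [mySplitF_nil] at hp
    simp at hp
    subst hp
    exact hsep (List.eq_nil_of_infix_nil hinf)
  | succ f ih =>
    intro l h p hp hinf
    cases l with
    | nil =>
      rw [mySplitF_nil] at hp; simp at hp; subst hp
      exact hsep (List.eq_nil_of_infix_nil hinf)
    | cons c rest =>
      simp only [mySplitF] at hp
      by_cases hpp : sep.isPrefixOf (c :: rest) = true
      · rw [if_pos hpp] at hp
        have hlen : ((c :: rest).drop sep.length).length ≤ f := by
          have : 1 ≤ sep.length := by cases sep <;> simp_all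
          simp only [List.length_drop, List.length_cons] at *
          omega
        rcases List.mem_cons.mp hp with h0 | h0
        · subst h0; exact hsep (List.eq_nil_of_infix_nil hinf)
        · exact ih _ hlen p h0 hinf
      · rw [if_neg hpp] at hp
        have hlen : rest.length ≤ f := by simp at h; omega
        rcases hm : mySplitF sep f rest with _ | ⟨q, qs⟩
        · exact absurd hm (mySplitF_ne_nil _ _ _)
        · rw [hm] at hp
          simp only [mapHead] at hp
          rcases List.mem_cons.mp hp with h0 | h0
          · subst h0
            rcases List.infix_cons_iff.mp hinf with h1 | h1
            · -- sep is a prefix of c :: q, and c :: q is a prefix of c :: rest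
              have hq : q <+: rest := by
                have := head_mySplitF_prefix sep f rest
                rw [hm] at this; simpa using this
              have : sep <+: (c :: rest) := h1.trans (List.cons_prefix_cons.mpr ⟨rfl, hq⟩)
              exact hpp (List.isPrefixOf_iff_prefix.mpr this)
            · exact ih _ hlen q (by rw [hm]; exact List.mem_cons_self ..) h1
          · exact ih _ hlen p (by rw [hm]; exact List.mem_cons_of_mem _ h0) hinf

def sepM : List Char := ['\n', '-', ' ']
def dashSp : List Char := ['-', ' ']

def linesC (l : List Char) : List (List Char) := mySplitF ['\n'] (l.length + 1) l
def partsC (l : List Char) : List (List Char) := mySplitF sepM (l.length + 1) l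

theorem linesC_ne_nil (l : List Char) : linesC l ≠ [] := mySplitF_ne_nil _ _ _
theorem partsC_ne_nil (l : List Char) : partsC l ≠ [] := mySplitF_ne_nil _ _ _

theorem join_linesC (l : List Char) : PySem.Chars.join ['\n'] (linesC l) = l :=
  join_mySplitF _ (by simp) _ _ (by omega)
theorem join_partsC (l : List Char) : PySem.Chars.join sepM (partsC l) = l :=
  join_mySplitF _ (by simp [sepM]) _ _ (by omega)
theorem not_infix_partsC (l : List Char) : ∀ p ∈ partsC l, ¬ sepM <:+: p :=
  not_infix_mySplitF _ (by simp [sepM]) _ _ (by omega)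

theorem linesC_nil : linesC [] = [[]] := rfl
theorem linesC_newline_cons (b : List Char) : linesC ('\n' :: b) = [] :: linesC b := by
  simp [linesC, mySplitF, List.isPrefixOf]
theorem linesC_cons (c : Char) (b : List Char) (h : c ≠ '\n') :
    linesC (c :: b) = mapHead (c :: ·) (linesC b) := by
  have h' : ('\n' == c) = false := beq_eq_false_iff_ne.mpr (Ne.symm h)
  simp [linesC, mySplitF, List.isPrefixOf, h']

theorem mapHead_append (f : List Char → List Char) (X Y : List (List Char)) (h : X ≠ []) :
    mapHead f (X ++ Y) = mapHead f X ++ Y := by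
  cases X with
  | nil => simp at h
  | cons p ps => simp [mapHead]

theorem linesC_append (a b : List Char) :
    linesC (a ++ '\n' :: b) = linesC a ++ linesC b := by
  induction a with
  | nil => simp [linesC_newline_cons, linesC_nil]
  | cons c a ih =>
    by_cases h : c = '\n'
    · subst h
      simp [linesC_newline_cons, ih]
    · rw [List.cons_append, linesC_cons c _ h, ih, linesC_cons c _ h,
        mapHead_append _ _ _ (linesC_ne_nil a)]

theorem mapHead_mapHead (f g : List Char → List Char) (X : List (List Char)) :
    mapHead f (mapHead g X) = mapHead (fun p => f (g p)) X := by
  cases X <;> simp [mapHead]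

theorem linesC_dash (c : List Char) :
    linesC ('-' :: ' ' :: c) = mapHead (fun p => '-' :: ' ' :: p) (linesC c) := by
  rw [linesC_cons '-' _ (by decide), linesC_cons ' ' _ (by decide), mapHead_mapHead]

-- every non-first line of ls sits in (join '\n' ls) right after a '\n'
theorem mem_tail_join (ls : List (List Char)) : ∀ m ∈ ls.tail,
    ∃ u v, PySem.Chars.join ['\n'] ls = u ++ '\n' :: (m ++ v) := by
  induction ls with
  | nil => simp
  | cons a rest ih =>
    intro m hm
    simp only [List.tail_cons] at hm
    cases rest with
    | nil => simp at hm
    | cons q qs =>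
      rw [PySem.Chars.join_cons_cons]
      rcases List.mem_cons.mp hm with h0 | h0
      · subst h0
        cases qs with
        | nil =>
          exact ⟨a, [], by simp [PySem.Chars.join_singleton]⟩
        | cons r rs =>
          rw [PySem.Chars.join_cons_cons]
          exact ⟨a, '\n' :: PySem.Chars.join ['\n'] (r :: rs), by simp⟩
      · rcases ih m (by simpa using h0) with ⟨u, v, huv⟩
        exact ⟨a ++ '\n' :: u, v, by simp [huv]⟩

-- Chars-level insertion conditions
def icondC (prev cur : List Char) : Bool :=
  PySem.Chars.startswith cur dashSp && !prev.isEmpty && !PySem.Chars.startswith prev dashSp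
def bCondC (last : List Char) : Bool :=
  !last.isEmpty && !PySem.Chars.startswith last dashSp

-- A's per-line insertions after the first line, at Chars level
def fixT (prev : List Char) : List (List Char) → List (List Char)
  | [] => []
  | cur :: rest => (if icondC prev cur then [[], cur] else [cur]) ++ fixT cur rest

def fixHead : List (List Char) → List (List Char)
  | [] => []
  | l0 :: rest => l0 :: fixT l0 rest

-- B's chunk loop at Chars level
def bRunC (st : List Char × List Char) : List (List Char) → List Char
  | [] => st.1
  | c :: cs =>
    bRunC (st.1 ++ (if bCondC st.2 then ['\n', '\n', '-', ' '] else sepM) ++ c,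
           (linesC ('-' :: ' ' :: c)).getLast?.getD []) cs

def glue (X : List Char) : List (List Char) → List Char
  | [] => X
  | p :: ps => glue (X ++ sepM ++ p) ps

-- a line after the first of a marker-free chunk never starts with '- '
theorem tail_lines_not_dash (c : List Char) (hc : ¬ sepM <:+: c) :
    ∀ q ∈ (linesC c).tail, PySem.Chars.startswith q dashSp = false := by
  intro q hq
  by_contra h
  have h' : PySem.Chars.startswith q dashSp = true := by simpa using h
  have hpre : dashSp <+: q := (PySem.Chars.startswith_iff _ _).mp h'
  have hdec : dashSp ++ q.drop 2 = q := List.prefix_iff_eq_append.mp hpre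
  rcases mem_tail_join (linesC c) q hq with ⟨u, v, huv⟩
  rw [join_linesC] at huv
  apply hc
  refine ⟨u, q.drop 2 ++ v, ?_⟩
  rw [huv, ← hdec]
  simp [sepM, dashSp]

theorem fixT_id (qs : List (List Char))
    (h : ∀ q ∈ qs, PySem.Chars.startswith q dashSp = false) :
    ∀ m, fixT m qs = qs := by
  induction qs with
  | nil => intro m; rfl
  | cons q qs ih =>
    intro m
    have hq := h q (List.mem_cons_self ..)
    simp [fixT, icondC, hq, ih (fun r hr => h r (List.mem_cons_of_mem _ hr))]

theorem fixT_append (ls : List (List Char)) : ∀ (p m0 : List Char) (qs : List (List Char)),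
    fixT p (ls ++ m0 :: qs)
      = fixT p ls ++ (if icondC ((p :: ls).getLast?.getD []) m0 then [[], m0] else [m0])
          ++ fixT m0 qs := by
  induction ls with
  | nil => intro p m0 qs; simp [fixT]
  | cons a ls ih =>
    intro p m0 qs
    rw [List.cons_append]
    show (if icondC p a then [[], a] else [a]) ++ fixT a (ls ++ m0 :: qs) = _
    rw [ih a m0 qs]
    have : (p :: a :: ls).getLast?.getD [] = (a :: ls).getLast?.getD [] := by
      simp [List.getLast?_cons_cons]
    rw [this]
    simp [fixT]

theorem join_append (s : List Char) (A B : List (List Char)) (hA : A ≠ []) (hB : B ≠ []) :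
    PySem.Chars.join s (A ++ B)
      = PySem.Chars.join s A ++ s ++ PySem.Chars.join s B := by
  induction A with
  | nil => simp at hA
  | cons a A ih =>
    cases A with
    | nil =>
      cases B with
      | nil => simp at hB
      | cons b bs => simp [PySem.Chars.join_cons_cons, PySem.Chars.join_singleton]
    | cons a2 A' =>
      simp only [List.cons_append]
      rw [PySem.Chars.join_cons_cons, ← List.cons_append, ih (by simp),
        PySem.Chars.join_cons_cons]
      simp

theorem fixHead_id (p : List Char) (hp : ¬ sepM <:+: p) :
    fixHead (linesC p) = linesC p := by
  rcases hL : linesC p with _ | ⟨q0, qs⟩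
  · exact absurd hL (linesC_ne_nil p)
  · have := tail_lines_not_dash p hp
    rw [hL] at this
    simp only [List.tail_cons] at this
    simp [fixHead, fixT_id qs this]

theorem glue_join (ps : List (List Char)) : ∀ X,
    glue X ps = PySem.Chars.join sepM (X :: ps) := by
  induction ps with
  | nil => intro X; simp [glue, PySem.Chars.join_singleton]
  | cons q ps ih =>
    intro X
    rw [show glue X (q :: ps) = glue (X ++ sepM ++ q) ps from rfl, ih,
      PySem.Chars.join_cons_cons]
    cases ps with
    | nil => simp [PySem.Chars.join_singleton]
    | cons r rs => simp [PySem.Chars.join_cons_cons]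

theorem inv_lemma (parts : List (List Char)) :
    (∀ p ∈ parts, ¬ sepM <:+: p) → ∀ X,
    bRunC (PySem.Chars.join ['\n'] (fixHead (linesC X)), (linesC X).getLast?.getD []) parts
      = PySem.Chars.join ['\n'] (fixHead (linesC (glue X parts))) := by
  induction parts with
  | nil => intro _ X; rfl
  | cons c ps ih =>
    intro hfree X
    obtain ⟨l0, ls, hL⟩ : ∃ a b, linesC X = a :: b := by
      rcases h : linesC X with _ | ⟨a, b⟩
      · exact absurd h (linesC_ne_nil X)
      · exact ⟨a, b, rfl⟩
    rcases hQ : linesC c with _ | ⟨q0, qs⟩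
    · exact absurd hQ (linesC_ne_nil c)
    have hdc : linesC ('-' :: ' ' :: c) = ('-' :: ' ' :: q0) :: qs := by
      rw [linesC_dash, hQ]; rfl
    have hX' : linesC (X ++ sepM ++ c) = (l0 :: ls) ++ ('-' :: ' ' :: q0) :: qs := by
      have : X ++ sepM ++ c = X ++ '\n' :: ('-' :: ' ' :: c) := by simp [sepM]
      rw [this, linesC_append, hL, hdc]
    have hqs : ∀ q ∈ qs, PySem.Chars.startswith q dashSp = false := by
      have := tail_lines_not_dash c (hfree c (List.mem_cons_self ..))
      rw [hQ] at this
      simpa using this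
    have hm0 : PySem.Chars.startswith ('-' :: ' ' :: q0) dashSp = true :=
      (PySem.Chars.startswith_iff _ _).mpr ⟨q0, rfl⟩
    have hprev : (l0 :: ls).getLast?.getD [] = (linesC X).getLast?.getD [] := by rw [hL]
    have hfix : fixHead (linesC (X ++ sepM ++ c))
        = l0 :: (fixT l0 ls
            ++ (if bCondC ((linesC X).getLast?.getD []) then [[], '-' :: ' ' :: q0]
                else ['-' :: ' ' :: q0]) ++ qs) := by
      rw [hX', List.cons_append]
      show l0 :: fixT l0 (ls ++ ('-' :: ' ' :: q0) :: qs) = _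
      rw [fixT_append, fixT_id qs hqs, hprev]
      have : icondC ((linesC X).getLast?.getD []) ('-' :: ' ' :: q0)
          = bCondC ((linesC X).getLast?.getD []) := by
        simp [icondC, bCondC, hm0]
      rw [this]
    have hjoin : PySem.Chars.join ['\n'] (fixHead (linesC (X ++ sepM ++ c)))
        = PySem.Chars.join ['\n'] (fixHead (linesC X))
            ++ (if bCondC ((linesC X).getLast?.getD []) then ['\n', '\n', '-', ' '] else sepM)
            ++ c := by
      rw [hfix]
      have hfixX : fixHead (linesC X) = l0 :: fixT l0 ls := by rw [hL]; rfl
      have hjq : PySem.Chars.join ['\n'] (('-' :: ' ' :: q0) :: qs) = '-' :: ' ' :: c := by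
        rw [← hdc, join_linesC]
      by_cases hb : bCondC ((linesC X).getLast?.getD []) = true
      · rw [if_pos hb]
        rw [show l0 :: (fixT l0 ls ++ [[], '-' :: ' ' :: q0] ++ qs)
            = (l0 :: fixT l0 ls) ++ ([] :: ('-' :: ' ' :: q0) :: qs) by simp]
        rw [join_append _ _ _ (by simp) (by simp), PySem.Chars.join_cons_cons, hjq, hfixX,
          if_pos hb]
        simp
      · rw [if_neg hb, if_neg hb]
        rw [show l0 :: (fixT l0 ls ++ ['-' :: ' ' :: q0] ++ qs)
            = (l0 :: fixT l0 ls) ++ (('-' :: ' ' :: q0) :: qs) by simp]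
        rw [join_append _ _ _ (by simp) (by simp), hjq, hfixX]
        simp [sepM]
    have hlast' : (linesC (X ++ sepM ++ c)).getLast?.getD []
        = (linesC ('-' :: ' ' :: c)).getLast?.getD [] := by
      rw [hX', hdc, List.getLast?_append]
      rcases h : (('-' :: ' ' :: q0) :: qs).getLast? with _ | v
      · simp at h
      · simp
    have hstep : bRunC (PySem.Chars.join ['\n'] (fixHead (linesC X)), (linesC X).getLast?.getD []) (c :: ps)
        = bRunC (PySem.Chars.join ['\n'] (fixHead (linesC X))
              ++ (if bCondC ((linesC X).getLast?.getD []) then ['\n', '\n', '-', ' '] else sepM) ++ c,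
            (linesC ('-' :: ' ' :: c)).getLast?.getD []) ps := rfl
    rw [hstep, ← hjoin, ← hlast',
      show glue X (c :: ps) = glue (X ++ sepM ++ c) ps from rfl]
    exact ih (fun p hp => hfree p (List.mem_cons_of_mem _ hp)) (X ++ sepM ++ c)

theorem mainC (T : List Char) :
    (match partsC T with
     | [] => []
     | p0 :: rest => bRunC (p0, (linesC p0).getLast?.getD []) rest)
      = PySem.Chars.join ['\n'] (fixHead (linesC T)) := by
  rcases hP : partsC T with _ | ⟨p0, rest⟩
  · exact absurd hP (partsC_ne_nil T)
  have hfree := not_infix_partsC T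
  rw [hP] at hfree
  have hp0 : ¬ sepM <:+: p0 := hfree p0 (List.mem_cons_self ..)
  have hbase : PySem.Chars.join ['\n'] (fixHead (linesC p0)) = p0 := by
    rw [fixHead_id p0 hp0, join_linesC]
  have hglue : glue p0 rest = T := by
    rw [glue_join, ← hP, join_partsC]
  have := inv_lemma rest (fun p hp => hfree p (List.mem_cons_of_mem _ hp)) p0
  rw [hbase, hglue] at this
  simpa using this

def icond' (prev cur : String) : Bool :=
  PySem.Str.startswith cur "- " && !(prev == "") && !PySem.Str.startswith prev "- "

theorem beq_empty_toList (s : String) : (s == "") = s.toList.isEmpty := by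
  rcases h : s.toList.isEmpty with _ | _
  · simp only [List.isEmpty_eq_false_iff] at h
    have : s ≠ "" := fun e => by subst e; simp at h
    simpa using this
  · simp only [List.isEmpty_iff] at h
    have : s = "" := String.toList_inj.mp (by simpa using h)
    simp [this]

theorem startswith_dash_toList (s : String) :
    PySem.Str.startswith s "- " = PySem.Chars.startswith s.toList dashSp := by
  rw [PySem.Str.startswith_eq]; rfl

theorem icond_toList (prev cur : String) :
    icond' prev cur = icondC prev.toList cur.toList := by
  rw [icond', icondC, beq_empty_toList, startswith_dash_toList, startswith_dash_toList]

def aRun' (prev : String) : List String → List String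
  | [] => []
  | cur :: rest => (if icond' prev cur then ["", cur] else [cur]) ++ aRun' cur rest

theorem map_toList_aRun (rest : List String) : ∀ prev,
    (aRun' prev rest).map String.toList = fixT prev.toList (rest.map String.toList) := by
  induction rest with
  | nil => intro prev; rfl
  | cons cur rest ih =>
    intro prev
    rw [show aRun' prev (cur :: rest)
        = (if icond' prev cur then ["", cur] else [cur]) ++ aRun' cur rest from rfl]
    rw [List.map_cons, show fixT prev.toList (cur.toList :: rest.map String.toList)
        = (if icondC prev.toList cur.toList then [[], cur.toList] else [cur.toList])
            ++ fixT cur.toList (rest.map String.toList) from rfl]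
    rw [← icond_toList, ← ih cur]
    by_cases h : icond' prev cur = true <;> simp [h]

-- str.split bridged to the structural splitter
theorem split_toList (s sep : String) (seps : List Char) (h : sep.toList = seps)
    (hne : seps ≠ []) :
    (((PySem.Str.split? s sep).getD []).map String.toList)
      = mySplitF seps (s.toList.length + 1) s.toList := by
  have h1 := PySem.Str.split?_map s sep
  rw [h] at h1
  have h2 : PySem.Chars.split? s.toList seps
      = some (mySplitF seps (s.toList.length + 1) s.toList) := by
    rw [PySem.Chars.split?, if_neg (by simpa using hne), splitOn_eq _ _ hne]
  rw [h2] at h1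
  cases hsp : PySem.Str.split? s sep with
  | none => rw [hsp] at h1; simp at h1
  | some L => rw [hsp] at h1; simpa using h1

theorem foldl_aStep_eq_aRun (ps : List (Int × String)) : ∀ (acc : List String) (prev : String),
    acc.getLast? = some prev → (∀ p ∈ ps, 0 < p.1) →
    ps.foldl aStep acc = acc ++ aRun' prev (ps.map Prod.snd) := by
  induction ps with
  | nil => intro acc prev _ _; simp [aRun']
  | cons p ps ih =>
    intro acc prev hlast hpos
    have hne : acc ≠ [] := by
      intro h; rw [h] at hlast; simp at hlast
    have hstep : aStep acc p =
        acc ++ (if icond' prev p.2 then ["", p.2] else [p.2]) := by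
      have hp1 : 0 < p.1 := hpos p (List.mem_cons_self ..)
      have hne' : acc.isEmpty = false := by simpa using hne
      simp only [aStep, icond', hlast, Option.getD_some, hne', decide_eq_true hp1,
        Bool.not_false, Bool.and_true]
      split_ifs <;> simp
    have hlast' : (aStep acc p).getLast? = some p.2 := by
      rw [hstep]
      by_cases h : icond' prev p.2 = true <;> simp [h, List.getLast?_append]
    rw [List.foldl_cons, ih (aStep acc p) p.2 hlast'
      (fun q hq => hpos q (List.mem_cons_of_mem _ hq)), hstep]
    by_cases h : icond' prev p.2 = true <;> simp [h, aRun', List.map_cons]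

theorem enumerate_pos (xs : List String) : ∀ (s : Int), 0 < s →
    ∀ p ∈ PySem.List.enumerate xs s, 0 < p.1 := by
  induction xs with
  | nil => intro s _ p hp; simp [PySem.List.enumerate] at hp
  | cons x xs ih =>
    intro s hs p hp
    rw [PySem.List.enumerate_cons] at hp
    rcases List.mem_cons.mp hp with h | h
    · rw [h]; exact hs
    · exact ih (s + 1) (by omega) p h


theorem A_chars (text : String) :
    (fix_markdown_for_pdf_py text).toList
      = PySem.Chars.join ['\n'] (fixHead (linesC text.toList)) := by
  have hlines : (((PySem.Str.split? text "\n").getD []).map String.toList)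
      = linesC text.toList := split_toList text "\n" ['\n'] rfl (by simp)
  have hA : fix_markdown_for_pdf_py text
      = PySem.Str.join "\n"
          ((PySem.List.enumerate ((PySem.Str.split? text "\n").getD []) 0).foldl aStep []) := rfl
  rcases hsp : (PySem.Str.split? text "\n").getD [] with _ | ⟨l0, rest⟩
  · rw [hsp] at hlines
    exact absurd hlines.symm (linesC_ne_nil text.toList)
  · rw [hsp] at hlines
    rw [hA, hsp, PySem.List.enumerate_cons]
    have h0 : aStep [] ((0 : Int), l0) = [l0] := by simp [aStep]
    rw [List.foldl_cons, h0, show (0 : Int) + 1 = 1 by norm_num,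
      foldl_aStep_eq_aRun (PySem.List.enumerate rest 1) [l0] l0 (by simp)
        (enumerate_pos rest 1 (by omega)),
      PySem.List.map_snd_enumerate]
    rw [PySem.Str.toList_join, show ("\n" : String).toList = ['\n'] from rfl]
    rw [show ([l0] ++ aRun' l0 rest).map String.toList
        = l0.toList :: (aRun' l0 rest).map String.toList by simp]
    rw [map_toList_aRun rest l0, ← hlines]
    rfl

theorem lastLn_toList (x : String) :
    ((PySem.List.pyGet? ((PySem.Str.split? x "\n").getD []) (-1)).getD "").toList
      = (linesC x.toList).getLast?.getD [] := by
  have hlines : (((PySem.Str.split? x "\n").getD []).map String.toList)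
      = linesC x.toList := split_toList x "\n" ['\n'] rfl (by simp)
  rw [PySem.List.pyGet?_neg_one, ← hlines, List.getLast?_map]
  cases ((PySem.Str.split? x "\n").getD []).getLast? <;> simp

theorem foldl_bStep_toList (rest : List String) : ∀ (o l : String),
    ((rest.foldl bStep (o, l)).1).toList = bRunC (o.toList, l.toList) (rest.map String.toList) := by
  induction rest with
  | nil => intro o l; rfl
  | cons ch rest ih =>
    intro o l
    rw [List.foldl_cons, List.map_cons,
      show bRunC (o.toList, l.toList) (ch.toList :: rest.map String.toList)
        = bRunC (o.toList ++ (if bCondC l.toList then ['\n', '\n', '-', ' '] else sepM)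
              ++ ch.toList,
            (linesC ('-' :: ' ' :: ch.toList)).getLast?.getD [])
            (rest.map String.toList) from rfl]
    have h1 : (bStep (o, l) ch).1.toList
        = o.toList ++ (if bCondC l.toList then ['\n', '\n', '-', ' '] else sepM) ++ ch.toList := by
      show (o ++ (if !(l == "") && !PySem.Str.startswith l "- " then "\n\n- " else "\n- ") ++ ch).toList = _
      rw [String.toList_append, String.toList_append]
      congr 2
      rw [beq_empty_toList, startswith_dash_toList]
      by_cases hb : bCondC l.toList = true
      · rw [if_pos hb, if_pos (by simpa [bCondC] using hb)]; rfl
      · rw [if_neg hb, if_neg (by simpa [bCondC] using hb)]; rfl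
    have h2 : (bStep (o, l) ch).2.toList = (linesC ('-' :: ' ' :: ch.toList)).getLast?.getD [] := by
      show ((PySem.List.pyGet? ((PySem.Str.split? ("- " ++ ch) "\n").getD []) (-1)).getD "").toList = _
      rw [lastLn_toList, String.toList_append, show ("- " : String).toList = ['-', ' '] from rfl]
      rfl
    rw [show rest.foldl bStep (bStep (o, l) ch) = rest.foldl bStep ((bStep (o, l) ch).1, (bStep (o, l) ch).2) from rfl]
    rw [ih, h1, h2]

theorem B_chars (text : String) :
    (fix_markdown_for_pdf_py_alt text).toList
      = (match partsC text.toList with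
         | [] => []
         | p0 :: rest => bRunC (p0, (linesC p0).getLast?.getD []) rest) := by
  have hparts : (((PySem.Str.split? text "\n- ").getD []).map String.toList)
      = partsC text.toList := split_toList text "\n- " sepM rfl (by simp [sepM])
  have hB : fix_markdown_for_pdf_py_alt text
      = ((PySem.List.slice ((PySem.Str.split? text "\n- ").getD []) (some 1) none).foldl bStep
          ((PySem.List.pyGet? ((PySem.Str.split? text "\n- ").getD []) 0).getD "",
           (PySem.List.pyGet? ((PySem.Str.split?
              ((PySem.List.pyGet? ((PySem.Str.split? text "\n- ").getD []) 0).getD "") "\n").getD []) (-1)).getD "")).1 := rfl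
  rcases hsp : (PySem.Str.split? text "\n- ").getD [] with _ | ⟨p0, rest⟩
  · rw [hsp] at hparts
    exact absurd hparts.symm (partsC_ne_nil text.toList)
  · rw [hsp] at hparts
    rw [hB, hsp, ← hparts]
    rw [PySem.List.pyGet?_zero_cons, Option.getD_some]
    rw [PySem.List.slice_from _ (by omega), show ((1 : Int)).toNat = 1 from rfl, List.drop_one,
      List.tail_cons]
    rw [foldl_bStep_toList, lastLn_toList]
    rfl

theorem ab_eq (text : String) : fix_markdown_for_pdf_py text = fix_markdown_for_pdf_py_alt text := by
  apply String.toList_inj.mp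
  rw [A_chars, B_chars, ← mainC]

-- ===== VERDICT (by name: the statement is the Claim_ definition above) =====
theorem fix_markdown_for_pdf_py_spec : Claim_equal_fix_markdown_for_pdf_py := by
  intro text _
  show fix_markdown_for_pdf_py text = fix_markdown_for_pdf_py_alt text
  exact ab_eq text
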